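-- pv_equiv track=rewrite | github.com/wang-xing-yi-git/FPGA-inconsistency | src/semantic_extraction.py | _merge_multiline_statements
-- ===== SOURCE A (Python) =====
-- def _merge_multiline_statements(lines: list) -> list:
--     """
--     【新增】合并跨行语句（处理端口、信号声明等跨行情况）
--
--     Args:
--         lines: 代码行列表
--
--     Returns:
--         合并后的行列表
--     """
--     merged = []
--     buffer = ""
--
--     for line in lines:
--         buffer += " " + line if buffer else line
--
--         # 检查是否可以结束当前语句
--         # 条件：以分号结尾 或 以 endmodule 结尾
--         stripped = buffer.strip()
--
--         # 计数开闭括号，确保语句完整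
--         open_parens = buffer.count('(') - buffer.count(')')
--         open_brackets = buffer.count('[') - buffer.count(']')
--         open_braces = buffer.count('{') - buffer.count('}')
--
--         if (
--             (stripped.endswith(';') or stripped.endswith('endmodule')) and
--             open_parens == 0 and open_brackets == 0 and open_braces == 0
--         ):
--             merged.append(buffer.strip())
--             buffer = ""
--
--     # 处理剩余的buffer
--     if buffer.strip():
--         merged.append(buffer.strip())
--
--     return merged
-- ===== SOURCE B (Python) =====
-- def _bracket_delta(line: str):
--     """Net (paren, bracket, brace) balance of one line, single char scan."""
--     p = b = c = 0
--     for ch in line: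
--         if ch == '(':
--             p += 1
--         elif ch == ')':
--             p -= 1
--         elif ch == '[':
--             b += 1
--         elif ch == ']':
--             b -= 1
--         elif ch == '{':
--             c += 1
--         elif ch == '}':
--             c -= 1
--     return p, b, c
--
--
-- def _split_statement_groups(lines: list):
--     """Phase 1: cut the line list into complete-statement groups + leftover."""
--     groups = []
--     cur = []
--     p = b = c = 0
--     tail = ""
--     for line in lines:
--         cur.append(line)
--         dp, db, dc = _bracket_delta(line)
--         p += dp
--         b += db
--         c += dc
--         r = line.rstrip()
--         if r:
--             tail = r
--         if (tail.endswith(';') or tail.endswith('endmodule')) and p == 0 and b == 0 and c == 0: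
--             groups.append(cur)
--             cur = []
--             tail = ""
--     return groups, cur
--
--
-- def _merge_multiline_statements(lines: list) -> list:
--     """Two-phase O(n): split into groups, then render each group once."""
--     groups, leftover = _split_statement_groups(lines)
--     out = [" ".join(g).strip() for g in groups]
--     rest = " ".join(leftover).strip()
--     if rest:
--         out.append(rest)
--     return out
-- ===== Notes on version B (the rewrite author's own statement) =====
-- stated objective: faster
-- what changed: A re-counts all three bracket kinds and re-strips the whole growing buffer on every line (O(L^2) per statement); B is a two-phase algorithm: phase 1 splits the line list into statement groups using incremental per-line bracket deltas (one char scan per line) and a running rstripped tail, phase 2 renders each group with a single join+strip.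
import Mathlib
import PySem

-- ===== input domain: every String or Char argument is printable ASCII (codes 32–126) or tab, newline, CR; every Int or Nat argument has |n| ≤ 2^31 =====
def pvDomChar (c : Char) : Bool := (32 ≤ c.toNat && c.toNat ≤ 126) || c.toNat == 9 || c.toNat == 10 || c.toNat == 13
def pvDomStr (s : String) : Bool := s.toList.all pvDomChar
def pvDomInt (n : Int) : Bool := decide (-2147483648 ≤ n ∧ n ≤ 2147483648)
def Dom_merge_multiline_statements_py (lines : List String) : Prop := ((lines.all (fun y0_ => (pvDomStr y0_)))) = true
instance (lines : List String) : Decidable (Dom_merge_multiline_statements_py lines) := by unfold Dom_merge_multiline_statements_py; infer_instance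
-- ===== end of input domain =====

-- B is a two-phase re-implementation: phase 1 cuts the line list into statement
-- groups using incremental per-line bracket deltas and a running rstripped tail,
-- phase 2 renders each group with one join+strip (objective: faster).

-- ===== PORT A =====
-- the 'for line in lines' loop of A, with the post-loop flush in the base case;
-- strings are carried as List Char (PySem.Chars = the Python string semantics)
def mmsLoopA : List (List Char) → List (List Char) → List Char → List (List Char)
  | [], merged, buffer =>
      -- if buffer.strip(): merged.append(buffer.strip())
      if PySem.Chars.strip buffer ≠ [] then merged ++ [PySem.Chars.strip buffer] else merged
  | line :: rest, merged, buffer =>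
      -- buffer += " " + line if buffer else line
      let buffer' := if buffer ≠ [] then buffer ++ ' ' :: line else line
      let stripped := PySem.Chars.strip buffer'
      let open_parens : Int := (PySem.Chars.count buffer' ['('] : Int) - (PySem.Chars.count buffer' [')'] : Int)
      let open_brackets : Int := (PySem.Chars.count buffer' ['['] : Int) - (PySem.Chars.count buffer' [']'] : Int)
      let open_braces : Int := (PySem.Chars.count buffer' ['{'] : Int) - (PySem.Chars.count buffer' ['}'] : Int)
      if (PySem.Chars.endswith stripped [';'] || PySem.Chars.endswith stripped ['e','n','d','m','o','d','u','l','e'])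
          && open_parens == 0 && open_brackets == 0 && open_braces == 0 then
        mmsLoopA rest (merged ++ [stripped]) []
      else
        mmsLoopA rest merged buffer'

def merge_multiline_statements_py (lines : List String) : List String :=
  (mmsLoopA (lines.map String.toList) [] []).map String.mk

-- ===== PORT B =====
-- _bracket_delta's per-character update
def mmsStep (t : Int × Int × Int) (ch : Char) : Int × Int × Int :=
  if ch = '(' then (t.1 + 1, t.2.1, t.2.2)
  else if ch = ')' then (t.1 - 1, t.2.1, t.2.2)
  else if ch = '[' then (t.1, t.2.1 + 1, t.2.2)
  else if ch = ']' then (t.1, t.2.1 - 1, t.2.2)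
  else if ch = '{' then (t.1, t.2.1, t.2.2 + 1)
  else if ch = '}' then (t.1, t.2.1, t.2.2 - 1)
  else t

-- _bracket_delta: one scan over the line's characters
def mmsDelta (line : List Char) : Int × Int × Int := line.foldl mmsStep (0, 0, 0)

-- _split_statement_groups: returns (complete groups, leftover lines)
def mmsSplit : List (List Char) → List (List Char) → Int → Int → Int → List Char →
    (List (List (List Char)) × List (List Char))
  | [], cur, _, _, _, _ => ([], cur)
  | line :: rest, cur, p, b, c, tail =>
      let cur' := cur ++ [line]
      let d := mmsDelta line
      let p' := p + d.1
      let b' := b + d.2.1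
      let c' := c + d.2.2
      let r := PySem.Chars.rstrip line
      let tail' := if r ≠ [] then r else tail
      if (PySem.Chars.endswith tail' [';'] || PySem.Chars.endswith tail' ['e','n','d','m','o','d','u','l','e'])
          && p' == 0 && b' == 0 && c' == 0 then
        ((cur' :: (mmsSplit rest [] p' b' c' []).1), (mmsSplit rest [] p' b' c' []).2)
      else
        mmsSplit rest cur' p' b' c' tail'

-- " ".join(g).strip()
def mmsRender (g : List (List Char)) : List Char :=
  PySem.Chars.strip (PySem.Chars.join [' '] g)

def merge_multiline_statements_py_alt (lines : List String) : List String :=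
  let res := mmsSplit (lines.map String.toList) [] 0 0 0 []
  let out := res.1.map mmsRender
  let rest := mmsRender res.2
  (if rest ≠ [] then out ++ [rest] else out).map String.mk

-- ===== PRECONDITION & SPEC =====
def Spec_merge_multiline_statements_py (lines : List String) (out : List String) : Prop := out = merge_multiline_statements_py_alt lines
instance (lines : List String) (out : List String) : Decidable (Spec_merge_multiline_statements_py lines out) := by unfold Spec_merge_multiline_statements_py; infer_instance

-- ===== CLAIM (what is proved, stated in full; the proofs are below) =====
def Claim_equal_merge_multiline_statements_py : Prop := ∀ (lines : List String), Dom_merge_multiline_statements_py lines → Spec_merge_multiline_statements_py lines (merge_multiline_statements_py lines)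

-- ===== LEMMAS AND PROOFS =====

-- Python s.count(c) for a single character c is the character count
lemma count_go_single (c : Char) : ∀ (s : List Char) (fuel acc : Nat), s.length ≤ fuel →
    PySem.Chars.count.go [c] fuel s acc = acc + s.count c := by
  intro s
  induction s with
  | nil => intro fuel acc h; cases fuel <;> simp [PySem.Chars.count.go]
  | cons h t ih =>
    intro fuel acc hle
    cases fuel with
    | zero => simp at hle
    | succ f =>
      simp only [PySem.Chars.count.go]
      by_cases hc : c = h
      · subst hc
        simp [List.isPrefixOf, ih f (acc+1) (by simpa using hle)]
        omega
      · simp [List.isPrefixOf, hc, ih f acc (by simpa using hle), Ne.symm hc]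

lemma count_single (s : List Char) (c : Char) : PySem.Chars.count s [c] = s.count c := by
  simp [PySem.Chars.count, count_go_single c s s.length 0 le_rfl]

-- the one-scan delta equals the three count differences
lemma delta_go (s : List Char) : ∀ t : Int × Int × Int,
    s.foldl mmsStep t =
      (t.1 + (s.count '(' : Int) - (s.count ')' : Int),
       t.2.1 + (s.count '[' : Int) - (s.count ']' : Int),
       t.2.2 + (s.count '{' : Int) - (s.count '}' : Int)) := by
  induction s with
  | nil => intro t; simp
  | cons a s ih =>
    intro t
    simp only [List.foldl_cons, ih, mmsStep, List.count_cons]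
    by_cases h1 : a = '('
    · subst h1; simp [Prod.ext_iff]; omega
    by_cases h2 : a = ')'
    · subst h2; simp [Prod.ext_iff]; omega
    by_cases h3 : a = '['
    · subst h3; simp [Prod.ext_iff]; omega
    by_cases h4 : a = ']'
    · subst h4; simp [Prod.ext_iff]; omega
    by_cases h5 : a = '{'
    · subst h5; simp [Prod.ext_iff]; omega
    by_cases h6 : a = '}'
    · subst h6; simp [Prod.ext_iff]; omega
    · simp [h1, h2, h3, h4, h5, h6]

lemma delta_eq (s : List Char) :
    mmsDelta s =
      ((s.count '(' : Int) - (s.count ')' : Int),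
       (s.count '[' : Int) - (s.count ']' : Int),
       (s.count '{' : Int) - (s.count '}' : Int)) := by
  simp [mmsDelta, delta_go]

lemma join_snoc (ps : List (List Char)) (y : List Char) (h : ps ≠ []) :
    PySem.Chars.join [' '] (ps ++ [y]) = PySem.Chars.join [' '] ps ++ ' ' :: y := by
  induction ps with
  | nil => simp at h
  | cons a t ih =>
    cases t with
    | nil => simp [PySem.Chars.join, List.intercalate]
    | cons b t' =>
      have := ih (by simp)
      simp [PySem.Chars.join, List.intercalate] at this ⊢
      simp [this]

lemma rstrip_append (a b : List Char) :
    PySem.Chars.rstrip (a ++ b) =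
      if PySem.Chars.rstrip b = [] then PySem.Chars.rstrip a else a ++ PySem.Chars.rstrip b := by
  simp only [PySem.Chars.rstrip, List.reverse_append, List.dropWhile_append]
  by_cases h : (List.dropWhile PySem.Chars.isspace b.reverse) = []
  · simp [h]
  · simp [h, List.isEmpty_iff, List.reverse_eq_nil_iff]

lemma rstrip_all_space (w : List Char) (h : ∀ ch ∈ w, PySem.Chars.isspace ch = true) :
    PySem.Chars.rstrip w = [] := by
  simp [PySem.Chars.rstrip, List.dropWhile_eq_nil_iff]
  intro x hx; exact h x (by simpa using hx)

-- strip ignores an all-whitespace prefix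
lemma strip_space_prefix (w s : List Char) (h : ∀ ch ∈ w, PySem.Chars.isspace ch = true) :
    PySem.Chars.strip (w ++ s) = PySem.Chars.strip s := by
  simp only [PySem.Chars.strip, PySem.Chars.lstrip, List.dropWhile_append]
  have : List.dropWhile PySem.Chars.isspace w = [] := by
    simp [List.dropWhile_eq_nil_iff]; exact h
  simp [this]

-- a whitespace-free pattern is a suffix through an all-content prefix ending in a space
lemma suffix_through_space (u : List Char) (b : Char) (hb : PySem.Chars.isspace b = true)
    (t pat : List Char) (hpat : ∀ ch ∈ pat, PySem.Chars.isspace ch = false) :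
    (pat <:+ (u ++ [b]) ++ t ↔ pat <:+ t) := by
  constructor
  · intro hps
    have hts : t <:+ (u ++ [b]) ++ t := List.suffix_append _ _
    by_cases hl : pat.length ≤ t.length
    · exact List.suffix_of_suffix_length_le hps hts hl
    · exfalso
      have htp : t <:+ pat := List.suffix_of_suffix_length_le hts hps (by omega)
      obtain ⟨x, hx⟩ := htp
      have hxne : x ≠ [] := by
        intro h; subst h; simp at hx; subst hx; omega
      obtain ⟨v, hv⟩ := hps
      rw [← hx, ← List.append_assoc] at hv
      have hvx : v ++ x = u ++ [b] := List.append_cancel_right hv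
      have hxs : x <:+ u ++ [b] := ⟨v, hvx⟩
      have hmem : x.getLast hxne ∈ pat := by
        rw [← hx]; exact List.mem_append_left _ (List.getLast_mem hxne)
      have hlast : x.getLast hxne = b := by
        obtain ⟨w, hw⟩ := hxs
        have h2 : (w ++ x).getLast (by simp [hxne]) = b := by
          simp only [hw]; simp
        rwa [List.getLast_append_of_ne_nil _ hxne] at h2
      have := hpat _ hmem
      rw [hlast, hb] at this; exact absurd this (by simp)
  · intro h; exact h.trans (List.suffix_append _ _)

-- ending test cares only about the right strip
lemma suffix_strip_iff (s pat : List Char) (hpat : ∀ ch ∈ pat, PySem.Chars.isspace ch = false) :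
    (pat <:+ PySem.Chars.strip s ↔ pat <:+ PySem.Chars.rstrip s) := by
  have hdecomp : s = s.takeWhile PySem.Chars.isspace ++ PySem.Chars.lstrip s := by
    simp [PySem.Chars.lstrip, List.takeWhile_append_dropWhile]
  have hw : ∀ ch ∈ s.takeWhile PySem.Chars.isspace, PySem.Chars.isspace ch = true := by
    intro ch hch; exact List.mem_takeWhile_imp hch
  rw [PySem.Chars.strip]
  conv_rhs => rw [hdecomp]
  rw [rstrip_append]
  by_cases hm : PySem.Chars.rstrip (PySem.Chars.lstrip s) = []
  · simp [hm, rstrip_all_space _ hw]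
  · simp only [hm, if_false]
    generalize s.takeWhile PySem.Chars.isspace = W at hw
    rcases List.eq_nil_or_concat W with rfl | ⟨ys, y, rfl⟩
    · simp
    · have hy : PySem.Chars.isspace y = true := hw _ (by simp)
      simp only [List.concat_eq_append]
      exact (suffix_through_space ys y hy _ pat hpat).symm

-- the loop invariant relating A's buffer to B's tail
def TailInv (buffer tail : List Char) : Prop :=
  PySem.Chars.rstrip buffer = tail ∨ (tail ≠ [] ∧ ∃ u, PySem.Chars.rstrip buffer = u ++ ' ' :: tail)

lemma tail_suffix_iff (buffer tail pat : List Char) (ht : TailInv buffer tail)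
    (hpat : ∀ ch ∈ pat, PySem.Chars.isspace ch = false) :
    (pat <:+ PySem.Chars.rstrip buffer ↔ pat <:+ tail) := by
  rcases ht with h | ⟨_, u, h⟩
  · rw [h]
  · rw [h, show u ++ ' ' :: tail = (u ++ [' ']) ++ tail by simp]
    exact suffix_through_space u ' ' (by decide) tail pat hpat

lemma endswith_strip_eq (buffer tail pat : List Char) (ht : TailInv buffer tail)
    (hpat : ∀ ch ∈ pat, PySem.Chars.isspace ch = false) :
    PySem.Chars.endswith (PySem.Chars.strip buffer) pat = PySem.Chars.endswith tail pat := by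
  have h1 := (suffix_strip_iff buffer pat hpat).trans (tail_suffix_iff buffer tail pat ht hpat)
  simp only [PySem.Chars.endswith]
  rw [Bool.eq_iff_iff]
  simpa [List.isSuffixOf_iff_suffix] using h1

lemma nospace_semi : ∀ ch ∈ [';'], PySem.Chars.isspace ch = false := by
  intro ch hch; fin_cases hch; rfl
lemma nospace_endmodule : ∀ ch ∈ ['e','n','d','m','o','d','u','l','e'], PySem.Chars.isspace ch = false := by
  intro ch hch; fin_cases hch <;> rfl

lemma rstrip_nil : PySem.Chars.rstrip [] = [] := by decide

lemma tailinv_nil (tail : List Char) (ht : TailInv [] tail) : tail = [] := by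
  rcases ht with h | ⟨_, u, h⟩
  · rw [rstrip_nil] at h; exact h.symm
  · rw [rstrip_nil] at h; exact absurd h (by simp)

-- main correspondence: A's loop on (merged, buffer) vs B's split-then-render
lemma loop_split : ∀ (ls : List (List Char)) (merged cur : List (List Char)) (p b c : Int)
    (tail buffer : List Char),
    (∃ w, (∀ ch ∈ w, PySem.Chars.isspace ch = true) ∧
        PySem.Chars.join [' '] cur = w ++ buffer) →
    p = (PySem.Chars.count buffer ['('] : Int) - (PySem.Chars.count buffer [')'] : Int) →
    b = (PySem.Chars.count buffer ['['] : Int) - (PySem.Chars.count buffer [']'] : Int) →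
    c = (PySem.Chars.count buffer ['{'] : Int) - (PySem.Chars.count buffer ['}'] : Int) →
    TailInv buffer tail →
    mmsLoopA ls merged buffer =
      merged ++ ((mmsSplit ls cur p b c tail).1.map mmsRender ++
        (if mmsRender (mmsSplit ls cur p b c tail).2 ≠ []
          then [mmsRender (mmsSplit ls cur p b c tail).2] else [])) := by
  intro ls
  induction ls with
  | nil =>
    intro merged cur p b c tail buffer hj hp hb hc ht
    obtain ⟨w, hw, hjw⟩ := hj
    have hr : mmsRender cur = PySem.Chars.strip buffer := by
      rw [mmsRender, hjw, strip_space_prefix w buffer hw]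
    simp only [mmsLoopA, mmsSplit, List.map_nil, List.nil_append, hr]
    by_cases hs : PySem.Chars.strip buffer = [] <;> simp [hs]
  | cons line rest ih =>
    intro merged cur p b c tail buffer hj hp hb hc ht
    obtain ⟨w, hw, hjw⟩ := hj
    simp only [mmsLoopA, mmsSplit]
    -- relate the new buffer with the new group
    set buffer' := if buffer ≠ [] then buffer ++ ' ' :: line else line with hbuf'
    have hjoin' : ∃ w', (∀ ch ∈ w', PySem.Chars.isspace ch = true) ∧
        PySem.Chars.join [' '] (cur ++ [line]) = w' ++ buffer' := by
      by_cases hcur : cur = []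
      · subst hcur
        have : w ++ buffer = [] := by simpa [PySem.Chars.join, List.intercalate] using hjw.symm
        have hb0 : buffer = [] := by
          rcases List.append_eq_nil_iff.mp this with ⟨_, h2⟩; exact h2
        refine ⟨[], by intro ch h; simp at h, ?_⟩
        simp [PySem.Chars.join, List.intercalate, hbuf', hb0]
      · rw [join_snoc cur line hcur, hjw]
        by_cases hb0 : buffer = []
        · refine ⟨w ++ [' '], ?_, ?_⟩
          · intro ch hch
            rcases List.mem_append.mp hch with h | h
            · exact hw ch h
            · simp at h; subst h; rfl
          · simp [hbuf', hb0]
        · exact ⟨w, hw, by simp [hbuf', hb0]⟩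
    -- counters are the count differences of buffer'
    have hcnt : ∀ (c1 c2 : Char), c1 ≠ ' ' → c2 ≠ ' ' →
        (PySem.Chars.count buffer' [c1] : Int) - (PySem.Chars.count buffer' [c2] : Int) =
        ((PySem.Chars.count buffer [c1] : Int) - (PySem.Chars.count buffer [c2] : Int))
          + ((line.count c1 : Int) - (line.count c2 : Int)) := by
      intro c1 c2 h1 h2
      by_cases hb0 : buffer = []
      · simp [hbuf', hb0, count_single]
      · simp [hbuf', hb0, count_single, List.count_append, List.count_cons,
          if_neg (Ne.symm h1), if_neg (Ne.symm h2)]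
        ring
    have hp' : p + (mmsDelta line).1 =
        (PySem.Chars.count buffer' ['('] : Int) - (PySem.Chars.count buffer' [')'] : Int) := by
      rw [delta_eq, hcnt '(' ')' (by decide) (by decide), hp]
    have hb' : b + (mmsDelta line).2.1 =
        (PySem.Chars.count buffer' ['['] : Int) - (PySem.Chars.count buffer' [']'] : Int) := by
      rw [delta_eq, hcnt '[' ']' (by decide) (by decide), hb]
    have hc' : c + (mmsDelta line).2.2 =
        (PySem.Chars.count buffer' ['{'] : Int) - (PySem.Chars.count buffer' ['}'] : Int) := by
      rw [delta_eq, hcnt '{' '}' (by decide) (by decide), hc]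
    -- tail invariant for buffer'
    set tail' := if PySem.Chars.rstrip line ≠ [] then PySem.Chars.rstrip line else tail with htl
    have htl' : TailInv buffer' tail' := by
      by_cases hb0 : buffer = []
      · have h0 : tail = [] := tailinv_nil tail (hb0 ▸ ht)
        by_cases hr : PySem.Chars.rstrip line = []
        · simp only [htl, hr, ne_eq, not_true_eq_false, if_false, h0]
          exact Or.inl (by simp [hbuf', hb0, hr])
        · simp only [htl, ne_eq, hr, not_false_eq_true, if_true]
          exact Or.inl (by simp [hbuf', hb0])
      · have hbl : buffer' = (buffer ++ [' ']) ++ line := by simp [hbuf', hb0]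
        by_cases hr : PySem.Chars.rstrip line = []
        · simp only [htl, hr, ne_eq, not_true_eq_false, if_false]
          have heq : PySem.Chars.rstrip buffer' = PySem.Chars.rstrip buffer := by
            rw [hbl, rstrip_append, if_pos hr, rstrip_append,
              if_pos (by decide : PySem.Chars.rstrip [' '] = [])]
          rcases ht with h | ⟨hne, u, h⟩
          · exact Or.inl (heq.trans h)
          · exact Or.inr ⟨hne, u, heq.trans h⟩
        · simp only [htl, ne_eq, hr, not_false_eq_true, if_true]
          refine Or.inr ⟨hr, buffer, ?_⟩
          rw [hbl, rstrip_append, if_neg hr]; simp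
    -- the two conditions agree
    have hends : ∀ pat, (∀ ch ∈ pat, PySem.Chars.isspace ch = false) →
        PySem.Chars.endswith (PySem.Chars.strip buffer') pat = PySem.Chars.endswith tail' pat :=
      fun pat hpat => endswith_strip_eq buffer' tail' pat htl' hpat
    rw [← hp', ← hb', ← hc', hends [';'] nospace_semi,
      hends ['e','n','d','m','o','d','u','l','e'] nospace_endmodule]
    by_cases hcd : ((PySem.Chars.endswith tail' [';'] ||
          PySem.Chars.endswith tail' ['e','n','d','m','o','d','u','l','e'])
        && (p + (mmsDelta line).1 == 0) && (b + (mmsDelta line).2.1 == 0)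
        && (c + (mmsDelta line).2.2 == 0)) = true
    · rw [if_pos hcd, if_pos hcd]
      obtain ⟨w', hw', hjw'⟩ := hjoin'
      have hrend : mmsRender (cur ++ [line]) = PySem.Chars.strip buffer' := by
        rw [mmsRender, hjw', strip_space_prefix w' buffer' hw']
      simp only [Bool.and_eq_true, beq_iff_eq] at hcd
      rw [ih (merged ++ [PySem.Chars.strip buffer']) []
        (p + (mmsDelta line).1) (b + (mmsDelta line).2.1) (c + (mmsDelta line).2.2) [] []
        ⟨[], by intro ch h; simp at h, by simp [PySem.Chars.join, List.intercalate]⟩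
        (by simp [count_single]; exact hcd.1.1.2) (by simp [count_single]; exact hcd.1.2)
        (by simp [count_single]; exact hcd.2) (Or.inl rstrip_nil)]
      simp [hrend]
    · rw [if_neg (by simpa using hcd), if_neg (by simpa using hcd)]
      exact ih merged (cur ++ [line]) _ _ _ tail' buffer' hjoin' hp' hb' hc' htl'

-- ===== VERDICT (by name: the statement is the Claim_ definition above) =====
theorem merge_multiline_statements_py_spec : Claim_equal_merge_multiline_statements_py := by
  intro lines _
  unfold Spec_merge_multiline_statements_py merge_multiline_statements_py merge_multiline_statements_py_alt
  rw [loop_split (lines.map String.toList) [] [] 0 0 0 [] []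
    ⟨[], by intro ch h; simp at h, by simp [PySem.Chars.join, List.intercalate]⟩
    (by simp [count_single]) (by simp [count_single]) (by simp [count_single])
    (Or.inl rstrip_nil)]
  simp only [List.nil_append]
  by_cases h : mmsRender (mmsSplit (lines.map String.toList) [] 0 0 0 []).2 = [] <;> simp [h]
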